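-- pv_equiv track=rewrite | github.com/sheyls/data-structures-algorithms | problems/shortest_substring.py | shortestUncommonSubstrings
-- ===== SOURCE A (Python) =====
-- def shortestUncommonSubstrings(arr):
--     n = len(arr)
--     answer = [""] * n
--
--     for i in range(n):
--         current_string = arr[i]
--         substrings = set()
--         length = len(current_string)
--
--         for l in range(length):
--             for r in range(l+1, length+1):
--                 substrings.add(current_string[l:r])
--
--         candidates = sorted(substrings, key=lambda x: (len(x),x))
--
--         for c in candidates:
--             is_unique = True
--             for j in range(n):
--                 if i == j:
--                     continue
--
--                 if c in arr[j]:
--                     is_unique = False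
--                     break
--
--             if is_unique:
--                 answer[i] = c
--                 break
--
--     return answer
-- ===== SOURCE B (Python) =====
-- def shortestUncommonSubstrings(arr):
--     def subs_of(s):
--         return {s[l:r] for l in range(len(s)) for r in range(l + 1, len(s) + 1)}
--
--     count = {}
--     for s in arr:
--         for c in subs_of(s):
--             count[c] = count.get(c, 0) + 1
--
--     return [min((c for c in subs_of(s) if count[c] == 1),
--                 key=lambda x: (len(x), x), default="")
--             for s in arr]
-- ===== Notes on version B (the rewrite author's own statement) =====
-- stated objective: faster
-- what changed: Instead of, per string, sorting its substrings and scanning every other string for containment of each candidate, B builds one global multiplicity map of substrings (counted once per owning string) and then picks each string's (len, lex)-minimal substring with global count 1 directly, eliminating all cross-string containment scans.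
import Mathlib
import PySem

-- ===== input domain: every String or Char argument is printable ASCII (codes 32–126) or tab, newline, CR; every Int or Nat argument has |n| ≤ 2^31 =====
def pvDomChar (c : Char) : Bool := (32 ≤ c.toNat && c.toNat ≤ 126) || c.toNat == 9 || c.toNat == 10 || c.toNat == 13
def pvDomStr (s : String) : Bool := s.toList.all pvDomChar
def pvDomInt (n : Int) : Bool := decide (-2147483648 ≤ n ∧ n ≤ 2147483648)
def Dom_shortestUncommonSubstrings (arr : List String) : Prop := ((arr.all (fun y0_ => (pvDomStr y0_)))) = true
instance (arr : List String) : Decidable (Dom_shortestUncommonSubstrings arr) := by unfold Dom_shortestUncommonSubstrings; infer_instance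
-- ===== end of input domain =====

-- B replaces A's per-candidate containment scans over all other strings by one global
-- substring-multiplicity dict built once; measured faster on large inputs.

-- ===== PORT A =====
-- the nested 'for l: for r: substrings.add(...)' loop of A
def aSubs (s : String) : PySem.Set String :=
  (PySem.List.pyRange 0 (PySem.Str.len s) 1).foldl (fun acc l =>
    (PySem.List.pyRange (l + 1) (PySem.Str.len s + 1) 1).foldl
      (fun acc2 r => PySem.Set.add acc2 (PySem.Str.slice s (some l) (some r))) acc)
    PySem.Set.empty

-- A's inner 'for j in range(n): … break' uniqueness check
def aIsUnique (arr : List String) (i : Int) (c : String) : Bool :=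
  (PySem.List.pyRange 0 (PySem.List.len arr) 1).all (fun j =>
    j == i || !(PySem.Str.isIn c (PySem.List.pyGetD arr j "")))

def shortestUncommonSubstrings (arr : List String) : List String :=
  (PySem.List.pyRange 0 (PySem.List.len arr) 1).foldl (fun answer i =>
    let currentString := PySem.List.pyGetD arr i ""
    let candidates := PySem.List.sorted2 (aSubs currentString)
      (fun x => PySem.Str.len x) (fun x => x) false
    match candidates.find? (aIsUnique arr i) with
    | some c => PySem.List.pySetD answer i c
    | none => answer)
    (List.replicate arr.length "")

-- ===== PORT B =====
-- B's set comprehension {s[l:r] for l … for r …}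
def subsOf (s : String) : PySem.Set String :=
  PySem.Set.ofList ((PySem.List.pyRange 0 (PySem.Str.len s) 1).flatMap (fun l =>
    (PySem.List.pyRange (l + 1) (PySem.Str.len s + 1) 1).map
      (fun r => PySem.Str.slice s (some l) (some r))))

def shortestUncommonSubstrings_alt (arr : List String) : List String :=
  let count := arr.foldl (fun d s =>
    (subsOf s).foldl (fun d2 c => d2.insert c (d2.getD c 0 + 1)) d)
    (PySem.Dict.empty : PySem.Dict String Int)
  arr.map (fun s =>
    ((PySem.List.min2? ((subsOf s).filter (fun c => count.getD c 0 == 1))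
        (fun x => PySem.Str.len x) (fun x => x)).getD ""))

-- ===== PRECONDITION & SPEC =====
def Spec_shortestUncommonSubstrings (arr : List String) (out : List String) : Prop := out = shortestUncommonSubstrings_alt arr
instance (arr : List String) (out : List String) : Decidable (Spec_shortestUncommonSubstrings arr out) := by unfold Spec_shortestUncommonSubstrings; infer_instance

-- ===== CLAIM (what is proved, stated in full; the proofs are below) =====
def Claim_equal_shortestUncommonSubstrings : Prop := ∀ (arr : List String), Dom_shortestUncommonSubstrings arr → Spec_shortestUncommonSubstrings arr (shortestUncommonSubstrings arr)

-- ===== LEMMAS AND PROOFS =====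

-- the (len, lex) sort key of both programs, as one injective key into a linear order
def pvKey (x : String) : Lex (Int × String) := toLex (PySem.Str.len x, x)

theorem pvKey_inj : Function.Injective pvKey := by
  intro a b h
  have := congrArg (fun p => (ofLex p).2) h
  simpa [pvKey] using this

-- the boolean comparator used by sorted2/min2? is exactly 'pvKey < pvKey'
theorem cmp_eq_key (a b : String) :
    (decide (PySem.Str.len a < PySem.Str.len b) ||
      (!decide (PySem.Str.len b < PySem.Str.len a) && decide (a < b)))
      = decide (pvKey a < pvKey b) := by
  simp only [pvKey, Prod.Lex.lt_iff, ofLex_toLex, PySem.Str.len_eq, Nat.cast_lt, Nat.cast_inj]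
  rcases lt_trichotomy a.length b.length with h | h | h
  · simp [h, Nat.lt_asymm h]
  · simp [h]
  · simp [Nat.lt_asymm h, h, Nat.ne_of_gt h]

theorem foldl_update {α : Type} [BEq α] (g : Int → List α) :
    ∀ (ls : List Int) (acc : PySem.Set α),
      ls.foldl (fun acc l => PySem.Set.update acc (g l)) acc
        = PySem.Set.update acc (ls.flatMap g)
  | [], acc => by simp [PySem.Set.update_nil]
  | l :: ls, acc => by
    simp only [List.foldl_cons, List.flatMap_cons, foldl_update g ls, PySem.Set.update_append]

-- A's substring set equals B's
theorem aSubs_eq_subsOf (s : String) : aSubs s = subsOf s := by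
  rw [aSubs, subsOf]
  have h1 : ∀ (l : Int) (acc : PySem.Set String),
      (PySem.List.pyRange (l + 1) (PySem.Str.len s + 1) 1).foldl
        (fun acc2 r => PySem.Set.add acc2 (PySem.Str.slice s (some l) (some r))) acc
      = PySem.Set.update acc ((PySem.List.pyRange (l + 1) (PySem.Str.len s + 1) 1).map
          (fun r => PySem.Str.slice s (some l) (some r))) := by
    intro l acc
    rw [PySem.Set.update_map_eq_foldl_add]
  simp only [h1]
  rw [foldl_update, PySem.Set.empty_eq, PySem.Set.update_nil_left]

-- membership in the substring set: the nonempty substrings of s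
theorem mem_subsOf (s c : String) :
    c ∈ subsOf s ↔ c ≠ "" ∧ PySem.Str.isIn c s = true := by
  rw [subsOf, PySem.Set.mem_ofList]
  simp only [List.mem_flatMap, List.mem_map, PySem.List.mem_pyRange_one]
  constructor
  · rintro ⟨l, ⟨hl0, hlL⟩, r, ⟨hlr, hrL⟩, rfl⟩
    rw [PySem.Str.len_eq] at hlL hrL
    have hl0' : 0 ≤ l := hl0
    have hr0 : 0 ≤ r := le_trans (by omega) hlr
    have hslice : (PySem.Str.slice s (some l) (some r)).toList
        = (s.toList.drop l.toNat).take (r.toNat - l.toNat) := by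
      rw [PySem.Str.toList_slice]
      show PySem.List.slice _ _ _ = _
      rw [PySem.List.slice_toNat _ hl0' hr0]
    constructor
    · intro hc
      have : (PySem.Str.slice s (some l) (some r)).toList = [] := by rw [hc]; rfl
      rw [hslice] at this
      have hlen := congrArg List.length this
      simp only [List.length_take, List.length_drop, List.length_nil] at hlen
      omega
    · rw [PySem.Str.isIn_iff_infix, hslice]
      exact ((s.toList.drop l.toNat).take_prefix _).isInfix.trans (s.toList.drop_suffix l.toNat).isInfix
  · rintro ⟨hne, hin⟩
    rw [PySem.Str.isIn_iff_infix] at hin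
    obtain ⟨pre, post, hsplit⟩ := hin
    have hcne : c.toList ≠ [] := by
      intro h; apply hne; rw [← String.toList_inj] at *; simpa using h
    have hclen : 1 ≤ c.toList.length := by
      cases hc : c.toList with
      | nil => exact absurd hc hcne
      | cons a t => simp
    refine ⟨(pre.length : Int), ?_, (pre.length : Int) + (c.toList.length : Int), ?_, ?_⟩
    · have := congrArg List.length hsplit
      simp only [List.length_append] at this
      rw [PySem.Str.len_eq]
      omega
    · have := congrArg List.length hsplit
      simp only [List.length_append] at this
      rw [PySem.Str.len_eq]
      omega
    · rw [← String.toList_inj, PySem.Str.toList_slice]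
      show PySem.List.slice _ _ _ = _
      rw [PySem.List.slice_natCast_add, ← hsplit, List.append_assoc]
      rw [List.drop_left, List.take_left]

-- the count dict of B is a countP over arr
theorem countD_aux (c : String) :
    ∀ (arr : List String) (d : PySem.Dict String Int),
      (arr.foldl (fun d s =>
        (subsOf s).foldl (fun d2 x => d2.insert x (d2.getD x 0 + 1)) d) d).getD c 0
        = d.getD c 0 + (arr.countP (fun s => decide (c ∈ subsOf s)) : Int)
  | [], d => by simp
  | s :: arr, d => by
    rw [List.foldl_cons, countD_aux c arr, PySem.Dict.getD_foldl_insert_add_one]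
    have hnd : (subsOf s).Nodup := PySem.Set.nodup_ofList _
    by_cases hc : c ∈ subsOf s
    · rw [List.count_eq_one_of_mem hnd hc]
      simp [hc]; ring
    · rw [List.count_eq_zero_of_not_mem hc]
      simp [hc]

-- countP = 1 at a known-true index ↔ no other index is true
theorem countP_one_iff {α : Type} (P : α → Bool) :
    ∀ (l : List α) (k : Nat) (hk : k < l.length), P l[k] = true →
    (l.countP P = 1 ↔ ∀ j, (hj : j < l.length) → j ≠ k → P l[j] = false)
  | [], k, hk => by simp at hk
  | a :: t, 0, hk => by
    intro h
    simp only [List.getElem_cons_zero] at h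
    rw [List.countP_cons, h, if_pos rfl]
    simp only [List.length_cons]
    constructor
    · intro h1 j hj hj0
      have ht : t.countP P = 0 := by omega
      rw [List.countP_eq_zero] at ht
      match j, hj0 with
      | j + 1, _ =>
        simp only [List.getElem_cons_succ]
        exact Bool.eq_false_iff.mpr fun hP => (ht _ (List.getElem_mem _) hP)
    · intro hall
      have ht : t.countP P = 0 := by
        rw [List.countP_eq_zero]
        intro x hx
        obtain ⟨j, hj, rfl⟩ := List.getElem_of_mem hx
        have := hall (j+1) (by simp; omega) (by omega)
        simpa using this
      omega
  | a :: t, k + 1, hk => by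
    intro h
    simp only [List.getElem_cons_succ] at h
    have hk' : k < t.length := by simpa using hk
    have IH := countP_one_iff P t k hk' h
    rw [List.countP_cons]
    have htpos : 0 < t.countP P := by
      rw [List.countP_pos_iff]
      exact ⟨t[k], List.getElem_mem _, h⟩
    by_cases hPa : P a = true
    · rw [if_pos hPa]
      constructor
      · intro hcontr; exact absurd hcontr (by omega)
      · intro hall
        exfalso
        have := hall 0 (by simp) (by omega)
        simp [hPa] at this
    · simp only [Bool.not_eq_true] at hPa
      rw [if_neg (by simp [hPa])]
      simp only [add_zero]
      rw [IH]
      constructor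
      · intro hall j hj hjk
        match j with
        | 0 => simpa using hPa
        | j + 1 =>
          simp only [List.getElem_cons_succ]
          exact hall j (by simpa using hj) (by omega)
      · intro hall j hj hjk
        have := hall (j+1) (by simp; omega) (by omega)
        simpa using this

theorem foldl_insertBy_pw {α κ : Type} [LinearOrder κ] (key : α → κ) :
    ∀ (xs acc : List α), acc.Pairwise (fun a b => key a ≤ key b) →
      (xs.foldl (fun acc x => PySem.List.insertBy (fun a b => decide (key a < key b)) x acc) acc).Pairwise
        (fun a b => key a ≤ key b)
  | [], acc, h => h
  | x :: xs, acc, h => by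
    rw [List.foldl_cons]
    exact foldl_insertBy_pw key xs _ (PySem.List.insertBy_pairwise_le key x acc h)

theorem find?_min_of_pairwise {α κ : Type} [LinearOrder κ] (key : α → κ) (p : α → Bool) :
    ∀ (c : List α), c.Pairwise (fun a b => key a ≤ key b) → ∀ m, c.find? p = some m →
      p m = true ∧ m ∈ c ∧ ∀ y ∈ c, p y = true → key m ≤ key y
  | [], _, m, h => by simp at h
  | a :: t, hpw, m, h => by
    rw [List.pairwise_cons] at hpw
    by_cases hpa : p a = true
    · rw [List.find?_cons_of_pos hpa] at h
      cases h
      exact ⟨hpa, List.mem_cons_self .., by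
        intro y hy _
        rcases List.mem_cons.mp hy with rfl | hy
        · exact le_refl _
        · exact hpw.1 y hy⟩
    · rw [List.find?_cons_of_neg (by simpa using hpa)] at h
      obtain ⟨h1, h2, h3⟩ := find?_min_of_pairwise key p t hpw.2 m h
      refine ⟨h1, List.mem_cons_of_mem _ h2, ?_⟩
      intro y hy hpy
      rcases List.mem_cons.mp hy with rfl | hy
      · exact absurd hpy hpa
      · exact h3 y hy hpy

def minStep {α κ : Type} [LinearOrder κ] (key : α → κ) (acc : Option α) (x : α) : Option α :=
  match acc with
  | none => some x
  | some m => if decide (key x < key m) = true then some x else some m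

theorem min_go {α κ : Type} [LinearOrder κ] (key : α → κ) :
    ∀ (ys : List α) (m : α), ∃ m',
      ys.foldl (minStep key) (some m) = some m'
        ∧ (m' = m ∨ m' ∈ ys) ∧ key m' ≤ key m ∧ ∀ y ∈ ys, key m' ≤ key y
  | [], m => ⟨m, rfl, Or.inl rfl, le_refl _, by simp⟩
  | x :: ys, m => by
    rw [List.foldl_cons]
    by_cases hlt : key x < key m
    · obtain ⟨m', h1, h2, h3, h4⟩ := min_go key ys x
      refine ⟨m', ?_, ?_, ?_, ?_⟩
      · simpa [minStep, hlt] using h1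
      · rcases h2 with rfl | h2
        · exact Or.inr (List.mem_cons_self ..)
        · exact Or.inr (List.mem_cons_of_mem _ h2)
      · exact le_of_lt (lt_of_le_of_lt h3 hlt)
      · intro y hy
        rcases List.mem_cons.mp hy with rfl | hy
        · exact h3
        · exact h4 y hy
    · obtain ⟨m', h1, h2, h3, h4⟩ := min_go key ys m
      refine ⟨m', ?_, ?_, h3, ?_⟩
      · simpa [minStep, hlt] using h1
      · rcases h2 with rfl | h2
        · exact Or.inl rfl
        · exact Or.inr (List.mem_cons_of_mem _ h2)
      · intro y hy
        rcases List.mem_cons.mp hy with rfl | hy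
        · exact le_trans h3 (not_lt.mp hlt)
        · exact h4 y hy

-- find? over an insertion sort by an injective key = first extremal of the filter
theorem find_sorted_eq_min_filter {α κ : Type} [LinearOrder κ] (key : α → κ)
    (hinj : Function.Injective key) (xs : List α) (p : α → Bool) :
    (xs.foldl (fun acc x => PySem.List.insertBy (fun a b => decide (key a < key b)) x acc) []).find? p
      = (xs.filter p).foldl (minStep key) none := by
  have hperm : (xs.foldl (fun acc x => PySem.List.insertBy (fun a b => decide (key a < key b)) x acc) []).Perm xs := by
    simpa using PySem.List.foldl_insertBy_perm (fun a b => decide (key a < key b)) xs []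
  have hpw := foldl_insertBy_pw key xs [] (List.Pairwise.nil)
  set srt := xs.foldl (fun acc x => PySem.List.insertBy (fun a b => decide (key a < key b)) x acc) [] with hsrt
  cases hf : srt.find? p with
  | none =>
    rw [List.find?_eq_none] at hf
    have : xs.filter p = [] := by
      rw [List.filter_eq_nil_iff]
      intro x hx
      exact fun hp => hf x (hperm.mem_iff.mpr hx) hp
    rw [this]
    rfl
  | some m =>
    obtain ⟨hpm, hmem, hmin⟩ := find?_min_of_pairwise key p srt hpw m hf
    have hmxs : m ∈ xs := hperm.mem_iff.mp hmem
    have hmf : m ∈ xs.filter p := List.mem_filter.mpr ⟨hmxs, hpm⟩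
    cases hfil : xs.filter p with
    | nil => rw [hfil] at hmf; simp at hmf
    | cons f0 fs =>
      rw [List.foldl_cons]
      obtain ⟨m', h1, h2, h3, h4⟩ := min_go key fs f0
      show _ = (fs.foldl _ (some f0))
      rw [h1]
      have hm'f : m' ∈ xs.filter p := by
        rw [hfil]
        rcases h2 with rfl | h2
        · exact List.mem_cons_self ..
        · exact List.mem_cons_of_mem _ h2
      have hm'min : ∀ y ∈ xs.filter p, key m' ≤ key y := by
        intro y hy
        rw [hfil] at hy
        rcases List.mem_cons.mp hy with rfl | hy
        · exact h3
        · exact h4 y hy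
      have hle1 : key m' ≤ key m := hm'min m hmf
      have hle2 : key m ≤ key m' := by
        obtain ⟨hx, hp'⟩ := List.mem_filter.mp hm'f
        exact hmin m' (hperm.mem_iff.mpr hx) hp'
      have : m = m' := hinj (le_antisymm hle2 hle1)
      rw [this]

-- A's per-index value
def gA (arr : List String) (k : Nat) : String :=
  match (PySem.List.sorted2 (aSubs (arr.getD k ""))
      (fun x => PySem.Str.len x) (fun x => x) false).find? (aIsUnique arr (k : Int)) with
  | some c => c
  | none => ""

theorem foldA (arr : List String) :
    ∀ (m : Nat), m ≤ arr.length →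
      (PySem.List.pyRange 0 (m : Int) 1).foldl (fun answer i =>
        let currentString := PySem.List.pyGetD arr i ""
        let candidates := PySem.List.sorted2 (aSubs currentString)
          (fun x => PySem.Str.len x) (fun x => x) false
        match candidates.find? (aIsUnique arr i) with
        | some c => PySem.List.pySetD answer i c
        | none => answer) (List.replicate arr.length "")
      = (List.range m).map (gA arr) ++ List.replicate (arr.length - m) ""
  | 0, _ => by
    simp only [Nat.cast_zero]
    rw [PySem.List.pyRange_one_eq_nil (le_refl 0)]
    simp
  | m + 1, hm => by
    have h1 : ((m + 1 : Nat) : Int) = (m : Int) + 1 := by push_cast; ring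
    rw [h1, PySem.List.pyRange_one_succ_right (by positivity), List.foldl_append,
      foldA arr m (by omega)]
    simp only [List.foldl_cons, List.foldl_nil]
    have hget : PySem.List.pyGetD arr (m : Int) "" = arr.getD m "" := by
      simp [PySem.List.pyGetD_natCast]
    rw [hget]
    have hlenmap : ((List.range m).map (gA arr)).length = m := by simp
    have hrep : List.replicate (arr.length - m) "" = "" :: List.replicate (arr.length - (m+1)) "" := by
      have : arr.length - m = (arr.length - (m+1)) + 1 := by omega
      rw [this, List.replicate_succ]
    rw [List.range_succ, List.map_append, List.map_cons, List.map_nil]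
    cases hf : (PySem.List.sorted2 (aSubs (arr.getD m ""))
        (fun x => PySem.Str.len x) (fun x => x) false).find? (aIsUnique arr (m : Int)) with
    | some c =>
      show PySem.List.pySetD _ (m : Int) c = _
      rw [PySem.List.pySetD_natCast, List.set_append_right _ _ (by omega), hlenmap]
      rw [hrep]
      simp only [Nat.sub_self, List.set_cons_zero]
      have : gA arr m = c := by rw [gA, hf]
      rw [this]
      simp
    | none =>
      show ((List.range m).map (gA arr) ++ List.replicate (arr.length - m) "") = _
      rw [hrep]
      have : gA arr m = "" := by rw [gA, hf]
      rw [this]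
      simp

theorem shortestUncommonSubstrings_eq_map (arr : List String) :
    shortestUncommonSubstrings arr = (List.range arr.length).map (gA arr) := by
  rw [shortestUncommonSubstrings]
  have : PySem.List.len arr = (arr.length : Int) := by simp [PySem.List.len_eq]
  rw [this, foldA arr arr.length (le_refl _)]
  simp

theorem match_getD (o : Option String) :
    (match o with | some c => c | none => "") = o.getD "" := by cases o <;> rfl

-- find? only looks at the predicate's values on the list
theorem find?_congr {α : Type} (p q : α → Bool) :
    ∀ (l : List α), (∀ x ∈ l, p x = q x) → l.find? p = l.find? q
  | [], _ => rfl
  | a :: t, h => by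
    have ha := h a (List.mem_cons_self ..)
    by_cases hpa : p a = true
    · rw [List.find?_cons_of_pos hpa, List.find?_cons_of_pos (ha ▸ hpa)]
    · rw [List.find?_cons_of_neg (by simpa using hpa),
        List.find?_cons_of_neg (by simp [← ha]; simpa using hpa)]
      exact find?_congr p q t (fun x hx => h x (List.mem_cons_of_mem _ hx))

-- A's uniqueness test agrees with B's count==1 test on members of the substring set
set_option maxHeartbeats 1000000 in
theorem pred_agree (arr : List String) (k : Nat) (hk : k < arr.length) (c : String)
    (hc : c ∈ subsOf arr[k]) :
    aIsUnique arr (k : Int) c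
      = ((arr.foldl (fun d s =>
          (subsOf s).foldl (fun d2 x => d2.insert x (d2.getD x 0 + 1)) d)
            (PySem.Dict.empty : PySem.Dict String Int)).getD c 0 == 1) := by
  obtain ⟨hcne, hcin⟩ := (mem_subsOf _ _).mp hc
  rw [countD_aux]
  have hPk : (fun s => decide (c ∈ subsOf s)) arr[k] = true := by simpa using hc
  rw [Bool.eq_iff_iff]
  constructor
  · intro hA
    rw [aIsUnique, List.all_eq_true] at hA
    have hcnt : arr.countP (fun s => decide (c ∈ subsOf s)) = 1 := by
      rw [countP_one_iff _ arr k hk hPk]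
      intro j hj hjk
      have := hA (j : Int) (by
        rw [PySem.List.mem_pyRange_one, PySem.List.len_eq]
        constructor
        · exact Int.natCast_nonneg j
        · exact_mod_cast hj)
      simp only [Bool.or_eq_true, beq_iff_eq, Bool.not_eq_eq_eq_not, Bool.not_true] at this
      rcases this with hji | hni
      · exact absurd (by exact_mod_cast hji) hjk
      · have hpg : PySem.List.pyGetD arr (j : Int) "" = arr[j] := by
          simp [PySem.List.pyGetD_natCast, List.getElem?_eq_getElem hj]
        rw [hpg] at hni
        simp only [decide_eq_false_iff_not, mem_subsOf]
        rintro ⟨-, h2⟩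
        rw [hni] at h2
        exact Bool.false_ne_true h2
    rw [PySem.Dict.getD_empty, hcnt]
    simp
  · intro hB
    rw [PySem.Dict.getD_empty, zero_add] at hB
    simp only [beq_iff_eq] at hB
    have hcnt : arr.countP (fun s => decide (c ∈ subsOf s)) = 1 := by exact_mod_cast hB
    rw [countP_one_iff _ arr k hk hPk] at hcnt
    rw [aIsUnique, List.all_eq_true]
    intro j hj
    rw [PySem.List.mem_pyRange_one] at hj
    obtain ⟨hj0, hjn⟩ := hj
    rw [PySem.List.len_eq] at hjn
    lift j to Nat using hj0 with jn
    have hjlt : jn < arr.length := by exact_mod_cast hjn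
    by_cases hji : jn = k
    · simp [hji]
    · have hPj := hcnt jn hjlt hji
      have hgd : PySem.List.pyGetD arr (jn : Int) "" = arr[jn] := by
        simp [PySem.List.pyGetD_natCast, List.getElem?_eq_getElem hjlt]
      rw [hgd]
      simp only [decide_eq_false_iff_not, mem_subsOf, not_and] at hPj
      have hisf : PySem.Str.isIn c arr[jn] = false := by
        cases hcase : PySem.Str.isIn c arr[jn] with
        | false => rfl
        | true => exact absurd hcase (hPj hcne)
      simp only [hisf, Bool.not_false, Bool.or_true]

-- per-index: A's find?-over-sorted equals B's min-of-filter
set_option maxHeartbeats 1000000 in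
theorem per_index (arr : List String) (k : Nat) (hk : k < arr.length) :
    gA arr k = ((PySem.List.min2? ((subsOf arr[k]).filter (fun c =>
        (arr.foldl (fun d s =>
          (subsOf s).foldl (fun d2 x => d2.insert x (d2.getD x 0 + 1)) d)
            (PySem.Dict.empty : PySem.Dict String Int)).getD c 0 == 1))
        (fun x => PySem.Str.len x) (fun x => x)).getD "") := by
  rw [gA, List.getD_eq_getElem _ _ hk, aSubs_eq_subsOf]
  have hcmp : (fun (a b : String) =>
        decide (PySem.Str.len a < PySem.Str.len b) ||
          (!decide (PySem.Str.len b < PySem.Str.len a) && decide (a < b)))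
      = fun a b => decide (pvKey a < pvKey b) := by
    funext a b; exact cmp_eq_key a b
  have hsorted : PySem.List.sorted2 (subsOf arr[k]) (fun x => PySem.Str.len x) (fun x => x) false
      = (subsOf arr[k]).foldl
          (fun acc x => PySem.List.insertBy (fun a b => decide (pvKey a < pvKey b)) x acc) [] := by
    rw [PySem.List.sorted2]
    simp only [if_neg (by decide : ¬ (false = true))]
    rw [hcmp]
  rw [hsorted]
  have hfc := find?_congr (aIsUnique arr (k : Int))
    (fun c => (arr.foldl (fun d s =>
        (subsOf s).foldl (fun d2 x => d2.insert x (d2.getD x 0 + 1)) d)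
          (PySem.Dict.empty : PySem.Dict String Int)).getD c 0 == 1)
    ((subsOf arr[k]).foldl
      (fun acc x => PySem.List.insertBy (fun a b => decide (pvKey a < pvKey b)) x acc) [])
    (by
      intro x hx
      have hmem : x ∈ subsOf arr[k] := by
        have hperm := PySem.List.foldl_insertBy_perm
          (fun a b => decide (pvKey a < pvKey b)) (subsOf arr[k]) []
        simp only [List.nil_append] at hperm
        exact hperm.mem_iff.mp hx
      exact pred_agree arr k hk x hmem)
  rw [hfc, find_sorted_eq_min_filter pvKey pvKey_inj]
  have hmin2 : PySem.List.min2? ((subsOf arr[k]).filter (fun c =>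
      (arr.foldl (fun d s =>
        (subsOf s).foldl (fun d2 x => d2.insert x (d2.getD x 0 + 1)) d)
          (PySem.Dict.empty : PySem.Dict String Int)).getD c 0 == 1)) (fun x => PySem.Str.len x) (fun x => x)
    = ((subsOf arr[k]).filter (fun c =>
      (arr.foldl (fun d s =>
        (subsOf s).foldl (fun d2 x => d2.insert x (d2.getD x 0 + 1)) d)
          (PySem.Dict.empty : PySem.Dict String Int)).getD c 0 == 1)).foldl (minStep pvKey) none := by
    rw [PySem.List.min2?]
    congr 1
    funext acc x
    cases acc with
    | none => rfl
    | some m => simp only [minStep, cmp_eq_key]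
  rw [hmin2, match_getD]

-- ===== VERDICT (by name: the statement is the Claim_ definition above) =====
theorem shortestUncommonSubstrings_spec : Claim_equal_shortestUncommonSubstrings := by
  intro arr _
  show shortestUncommonSubstrings arr = shortestUncommonSubstrings_alt arr
  rw [shortestUncommonSubstrings_eq_map, shortestUncommonSubstrings_alt]
  apply List.ext_getElem
  · simp
  · intro k h1 h2
    have hk : k < arr.length := by simpa using h2
    simp only [List.getElem_map, List.getElem_range]
    rw [per_index arr k hk]
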